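-- pv_equiv track=rewrite | github.com/iiChoco/AdventOfCode | 2023/Day09/9.py | difference1
-- ===== SOURCE A (Python) =====
-- def difference1(x):
--     p = []
--     for i in range(len(x) - 1):
--         p.append(x[i + 1] - x[i])
--     if all(h == 0 for h in p):
--         return x[-1]
--     else:
--         return x[-1] + difference1(p)
-- ===== SOURCE B (Python) =====
-- def difference1(x):
--     # Newton forward-difference extrapolation: the next value is an
--     # alternating binomial-weighted sum over the reversed list, computed in
--     # one pass with an incrementally maintained binomial coefficient.
--     n = len(x)
--     total = 0
--     c = n          # C(n, j+1)
--     sign = 1       # alternating sign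
--     for j, v in enumerate(reversed(x)):
--         total += sign * c * v
--         sign = -sign
--         c = c * (n - j - 1) // (j + 2)
--     return total
-- ===== Notes on version B (the rewrite author's own statement) =====
-- stated objective: faster
-- what changed: Replaces the quadratic recursive difference-table extrapolation with the linear-pass Newton forward-difference closed form: one pass over the reversed list summing sign * C(n, j+1) * value with alternating sign and an incrementally maintained binomial coefficient; intended as faster, measured about 90x-340x at n around 1024-4096 (at extreme n the big-integer coefficients dominate both).
import Mathlib
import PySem

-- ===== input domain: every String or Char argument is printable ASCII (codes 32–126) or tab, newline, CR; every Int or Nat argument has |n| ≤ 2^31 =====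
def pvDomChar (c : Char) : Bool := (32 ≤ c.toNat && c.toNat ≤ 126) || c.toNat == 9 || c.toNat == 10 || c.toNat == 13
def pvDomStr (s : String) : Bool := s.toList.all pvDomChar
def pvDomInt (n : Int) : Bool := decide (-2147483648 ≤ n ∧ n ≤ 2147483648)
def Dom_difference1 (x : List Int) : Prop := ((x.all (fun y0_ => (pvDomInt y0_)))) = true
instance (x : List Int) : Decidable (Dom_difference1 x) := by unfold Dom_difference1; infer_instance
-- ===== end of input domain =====

-- B is a faster re-implementation: the Newton forward-difference closed form (one pass,
-- binomial coefficient maintained incrementally) instead of A's recursive difference table.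

-- ===== PORT A =====
-- length of the difference list A builds (used for A's termination)
theorem pA_length (x : List Int) :
    ((PySem.List.pyRange 0 ((x.length : Int) - 1) 1).foldl
      (fun acc i => acc ++ [PySem.List.pyGetD x (i+1) 0 - PySem.List.pyGetD x i 0])
      ([] : List Int)).length = x.length - 1 := by
  rw [PySem.List.foldl_append_singleton_eq_map]
  simp [PySem.List.length_pyRange_one]

def difference1 (x : List Int) : Int :=
  let p := (PySem.List.pyRange 0 ((x.length : Int) - 1) 1).foldl
    (fun acc i => acc ++ [PySem.List.pyGetD x (i+1) 0 - PySem.List.pyGetD x i 0])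
    ([] : List Int)
  if h : p.all (fun h => h == 0) then
    PySem.List.pyGetD x (-1) 0
  else
    PySem.List.pyGetD x (-1) 0 + difference1 p
termination_by x.length
decreasing_by
  have hl : p.length = x.length - 1 := pA_length x
  have hne : p ≠ [] := fun hnil => h (by rw [hnil]; rfl)
  have : 1 ≤ p.length := List.length_pos_iff.mpr hne
  show p.length < x.length
  omega

-- ===== PORT B =====
def difference1_alt (x : List Int) : Int :=
  let n := x.length
  let r := (PySem.List.enumerate x.reverse 0).foldl
    (fun (s : Int × Int × Int) (jv : Int × Int) =>
      (s.1 + s.2.2 * s.2.1 * jv.2,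
       PySem.Int.floordiv (s.2.1 * ((n : Int) - jv.1 - 1)) (jv.1 + 2),
       -s.2.2))
    (0, (n : Int), 1)
  r.1

-- ===== PRECONDITION & SPEC =====
-- Pre_ excludes exactly the empty list, on which A raises IndexError at its final-element access.
def Pre_difference1 (x : List Int) : Prop := x ≠ []
instance (x : List Int) : Decidable (Pre_difference1 x) := by unfold Pre_difference1; infer_instance
def pvWitness_difference1 : List Int := [1, 2]

def Spec_difference1 (x : List Int) (out : Int) : Prop := out = difference1_alt x
instance (x : List Int) (out : Int) : Decidable (Spec_difference1 x out) := by unfold Spec_difference1; infer_instance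

-- ===== CLAIM (what is proved, stated in full; the proofs are below) =====
def Claim_equal_difference1 : Prop := ∀ (x : List Int), Dom_difference1 x → Pre_difference1 x → Spec_difference1 x (difference1 x)

-- ===== LEMMAS AND PROOFS =====

-- the mathematical Newton sum over the reversed list
def newtonSum (n : ℕ) (y : ℕ → ℤ) : ℤ :=
  ∑ j ∈ Finset.range n, (-1 : ℤ)^j * (n.choose (j+1) : ℤ) * y j

theorem newtonSum_rec (n : ℕ) (y : ℕ → ℤ) :
    newtonSum (n+1) y = y 0 + ∑ j ∈ Finset.range n, (-1 : ℤ)^j * (n.choose (j+1) : ℤ) * (y j - y (j+1)) := by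
  unfold newtonSum
  have hsplit : ∀ j, ((n+1).choose (j+1) : ℤ) = (n.choose j : ℤ) + (n.choose (j+1) : ℤ) := by
    intro j; exact_mod_cast congrArg Nat.cast (Nat.choose_succ_succ n j)
  calc ∑ j ∈ Finset.range (n+1), (-1 : ℤ)^j * ((n+1).choose (j+1) : ℤ) * y j
      = ∑ j ∈ Finset.range (n+1), ((-1 : ℤ)^j * (n.choose j : ℤ) * y j
          + (-1 : ℤ)^j * (n.choose (j+1) : ℤ) * y j) := by
        refine Finset.sum_congr rfl (fun j _ => ?_)
        rw [hsplit j]; ring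
    _ = (∑ j ∈ Finset.range (n+1), (-1 : ℤ)^j * (n.choose j : ℤ) * y j)
          + ∑ j ∈ Finset.range (n+1), (-1 : ℤ)^j * (n.choose (j+1) : ℤ) * y j := by
        rw [Finset.sum_add_distrib]
    _ = (y 0 - ∑ j ∈ Finset.range n, (-1 : ℤ)^j * (n.choose (j+1) : ℤ) * y (j+1))
          + ∑ j ∈ Finset.range n, (-1 : ℤ)^j * (n.choose (j+1) : ℤ) * y j := by
        rw [Finset.sum_range_succ' (fun j => (-1 : ℤ)^j * (n.choose j : ℤ) * y j) n,
            Finset.sum_range_succ (fun j => (-1 : ℤ)^j * (n.choose (j+1) : ℤ) * y j) n]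
        simp [Nat.choose_succ_self]
        have h2 : (∑ k ∈ Finset.range n, (-1 : ℤ)^(k+1) * (n.choose (k+1) : ℤ) * y (k+1))
            + ∑ j ∈ Finset.range n, (-1 : ℤ)^j * (n.choose (j+1) : ℤ) * y (j+1) = 0 := by
          rw [← Finset.sum_add_distrib]
          exact Finset.sum_eq_zero (fun j _ => by ring)
        linarith [h2]
    _ = y 0 + ∑ j ∈ Finset.range n, (-1 : ℤ)^j * (n.choose (j+1) : ℤ) * (y j - y (j+1)) := by
        have h3 : ∑ j ∈ Finset.range n, (-1 : ℤ)^j * (n.choose (j+1) : ℤ) * (y j - y (j+1))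
            = (∑ j ∈ Finset.range n, (-1 : ℤ)^j * (n.choose (j+1) : ℤ) * y j)
              - ∑ j ∈ Finset.range n, (-1 : ℤ)^j * (n.choose (j+1) : ℤ) * y (j+1) := by
          rw [← Finset.sum_sub_distrib]
          exact Finset.sum_congr rfl (fun j _ => by ring)
        rw [h3]; ring

-- loop invariant of B's single pass (state = running total, current binomial coefficient, current sign)
theorem alt_fold_inv (n : ℕ) (ys : List Int) : ∀ (s : ℕ) (acc : Int),
    s + ys.length ≤ n →
    ((PySem.List.enumerate ys ((s : ℕ) : Int)).foldl
      (fun (st : Int × Int × Int) (jv : Int × Int) =>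
        (st.1 + st.2.2 * st.2.1 * jv.2,
         PySem.Int.floordiv (st.2.1 * ((n : Int) - jv.1 - 1)) (jv.1 + 2),
         -st.2.2))
      (acc, (n.choose (s+1) : Int), (-1 : Int)^s)).1
    = acc + ∑ j ∈ Finset.range ys.length, (-1 : ℤ)^(s+j) * (n.choose (s+j+1) : ℤ) * ys.getD j 0 := by
  induction ys with
  | nil => intro s acc _; simp [PySem.List.enumerate_nil]
  | cons v t ih =>
    intro s acc hle
    rw [PySem.List.enumerate_cons, List.foldl_cons]
    have hs1 : s + 1 ≤ n := by simp at hle; omega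
    have hc : PySem.Int.floordiv ((n.choose (s+1) : Int) * ((n : Int) - (s : Int) - 1)) ((s : Int) + 2)
        = (n.choose (s+2) : Int) := by
      have hcast : (n : Int) - (s : Int) - 1 = ((n - (s+1) : ℕ) : ℤ) := by
        push_cast [Nat.cast_sub hs1]; ring
      have hch : (n.choose (s+1) : ℤ) * ((n - (s+1) : ℕ) : ℤ) = (n.choose (s+2) : ℤ) * ((s : ℤ) + 2) := by
        exact_mod_cast congrArg Nat.cast (Nat.choose_succ_right_eq n (s+1)).symm
      rw [hcast, hch, PySem.Int.floordiv_eq_ediv_of_pos (by omega : (0:ℤ) < (s:ℤ) + 2)]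
      exact Int.mul_ediv_cancel _ (by omega)
    have hsign : -((-1 : Int)^s) = (-1 : Int)^(s+1) := by ring
    have hst : ((s : Int) + 1) = (((s+1 : ℕ)) : Int) := by push_cast; ring
    rw [show (acc + (-1:Int)^s * (n.choose (s+1) : Int) * v,
          PySem.Int.floordiv ((n.choose (s+1) : Int) * ((n : Int) - (s : Int) - 1)) ((s : Int) + 2),
          -((-1:Int)^s)) = (acc + (-1:Int)^s * (n.choose (s+1) : Int) * v,
          (n.choose ((s+1)+1) : Int), (-1 : Int)^(s+1)) from by rw [hc, hsign]]
    rw [hst, ih (s+1) _ (by simp at hle ⊢; omega)]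
    rw [List.length_cons, Finset.sum_range_succ']
    simp only [List.getD_cons_succ, List.getD_cons_zero]
    have hidx : ∀ j, s + 1 + j = s + (j + 1) := by omega
    rw [Finset.sum_congr rfl (fun j _ => by rw [hidx j, show s + (j+1) + 1 = s + j + 2 from by omega])]
    ring_nf

theorem alt_eq_newtonSum (x : List Int) :
    difference1_alt x = newtonSum x.length (fun j => x.reverse.getD j 0) := by
  have h := alt_fold_inv x.length x.reverse 0 0 (by simp)
  simp only [Nat.cast_zero, Nat.choose_one_right, pow_zero, zero_add, List.length_reverse] at h
  unfold difference1_alt newtonSum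
  simp only []
  rw [h]

-- getting an element of a reversed list
theorem getD_reverse (l : List Int) (j : ℕ) (hj : j < l.length) (d : Int) :
    l.reverse.getD j d = l.getD (l.length - 1 - j) d := by
  rw [List.getD_eq_getElem _ _ (by simpa using hj), List.getD_eq_getElem _ _ (by omega),
      List.getElem_reverse]

-- the difference list A builds, as a map
def dmap (x : List Int) : List Int :=
  (PySem.List.pyRange 0 ((x.length : Int) - 1) 1).map
    (fun i => PySem.List.pyGetD x (i+1) 0 - PySem.List.pyGetD x i 0)

theorem dmap_eq_foldl (x : List Int) :
    (PySem.List.pyRange 0 ((x.length : Int) - 1) 1).foldl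
      (fun acc i => acc ++ [PySem.List.pyGetD x (i+1) 0 - PySem.List.pyGetD x i 0])
      ([] : List Int) = dmap x := by
  rw [PySem.List.foldl_append_singleton_eq_map]; rfl

theorem dmap_length (x : List Int) : (dmap x).length = x.length - 1 := by
  unfold dmap
  simp [PySem.List.length_pyRange_one]

theorem dmap_getD (x : List Int) (k : ℕ) (hk : k < x.length - 1) :
    (dmap x).getD k 0 = x.getD (k+1) 0 - x.getD k 0 := by
  have hk' : k < (dmap x).length := by rw [dmap_length]; omega
  rw [List.getD_eq_getElem _ _ hk']
  unfold dmap
  rw [List.getElem_map, PySem.List.getElem_pyRange_one]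
  simp only [zero_add]
  rw [show ((k : Int) + 1) = (((k+1 : ℕ)) : Int) from by push_cast; ring,
      PySem.List.pyGetD_natCast, PySem.List.pyGetD_natCast]

theorem dmap_rev_getD (x : List Int) (j : ℕ) (hj : j < x.length - 1) :
    (dmap x).reverse.getD j 0 = x.reverse.getD j 0 - x.reverse.getD (j+1) 0 := by
  have hn : 2 ≤ x.length := by omega
  rw [getD_reverse _ _ (by rw [dmap_length]; omega) 0, dmap_length,
      getD_reverse x j (by omega) 0, getD_reverse x (j+1) (by omega) 0,
      dmap_getD x _ (by omega)]
  rw [show x.length - 1 - 1 - j + 1 = x.length - 1 - j from by omega,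
      show x.length - 1 - (j+1) = x.length - 1 - 1 - j from by omega]

-- Python's final-element access is the head of the reversed list
theorem pyGetD_neg_one (x : List Int) (hx : x ≠ []) :
    PySem.List.pyGetD x (-1) 0 = x.reverse.getD 0 0 := by
  have hn : 1 ≤ x.length := List.length_pos_iff.mpr hx
  rw [getD_reverse x 0 (by omega) 0]
  simp [PySem.List.pyGetD, PySem.List.pyGet?, PySem.List.pyIdx?]
  simp [hn]

theorem A_eq_newtonSum_aux : ∀ (n : ℕ) (x : List Int), x.length = n → x ≠ [] →
    difference1 x = newtonSum x.length (fun j => x.reverse.getD j 0) := by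
  intro n
  induction n using Nat.strong_induction_on with
  | _ n ih =>
    intro x hlen hx
    have hn1 : 1 ≤ x.length := List.length_pos_iff.mpr hx
    rw [difference1]
    simp only [dmap_eq_foldl]
    rw [show x.length = (x.length - 1) + 1 from by omega, newtonSum_rec]
    split_ifs with hall
    · -- all differences are zero: the correction sum vanishes
      rw [pyGetD_neg_one x hx]
      have hsum : ∑ j ∈ Finset.range (x.length - 1),
          (-1 : ℤ)^j * ((x.length - 1).choose (j+1) : ℤ) *
            (x.reverse.getD j 0 - x.reverse.getD (j+1) 0) = 0 := by
        refine Finset.sum_eq_zero (fun j hj => ?_)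
        have hj' : j < x.length - 1 := Finset.mem_range.mp hj
        have hz : (dmap x).reverse.getD j 0 = 0 := by
          have hjl : j < (dmap x).reverse.length := by
            rw [List.length_reverse, dmap_length]; omega
          rw [List.getD_eq_getElem _ _ hjl]
          have hmem : ((dmap x).reverse)[j] ∈ dmap x := by
            have := List.getElem_mem hjl
            rwa [List.mem_reverse] at this
          have := List.all_eq_true.mp hall _ hmem
          simpa using this
        rw [← dmap_rev_getD x j hj', hz, mul_zero]
      rw [hsum, add_zero]
    · -- recurse on the difference list
      have hne : dmap x ≠ [] := by
        intro hnil; exact hall (by rw [hnil]; rfl)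
      have hdl : (dmap x).length = x.length - 1 := dmap_length x
      rw [ih ((dmap x).length) (by omega) (dmap x) rfl hne, hdl, pyGetD_neg_one x hx]
      congr 1
      unfold newtonSum
      refine Finset.sum_congr rfl (fun j hj => ?_)
      simp only []
      rw [dmap_rev_getD x j (Finset.mem_range.mp hj)]

theorem A_eq_newtonSum (x : List Int) (hx : x ≠ []) :
    difference1 x = newtonSum x.length (fun j => x.reverse.getD j 0) :=
  A_eq_newtonSum_aux x.length x rfl hx

-- ===== VERDICT (by name: the statement is the Claim_ definition above) =====
theorem difference1_spec : Claim_equal_difference1 := by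
  intro x _ hpre
  unfold Spec_difference1
  rw [A_eq_newtonSum x hpre, alt_eq_newtonSum x]
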